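-- pv_equiv track=rewrite | github.com/brkn45/GTU-Homework-and-Project | Introduction to Algorithms/2022/hw5/sinav.py | find_cut_vertices
-- ===== SOURCE A (Python) =====
-- def dfs(graph, vertex, visited):
--   """DFS ile grafı tarar ve ziyaret edilen düğümleri visited listesine ekler"""
--   visited.append(vertex)
--   for neighbor in graph[1]:
--     if neighbor[0] == vertex:
--       if neighbor[1] not in visited:
--         dfs(graph, neighbor[1], visited)
--     elif neighbor[1] == vertex:
--       if neighbor[0] not in visited:
--         dfs(graph, neighbor[0], visited)
--
-- def find_cut_vertices(graph):
--   """Graf içinde bölücü düğümleri bulur"""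
--   cut_vertices = []
--   for vertex in graph[0]:
--     visited = []
--     dfs(graph, vertex, visited)
--     if len(visited) < len(graph[0]):
--       cut_vertices.append(vertex)
--   return cut_vertices
-- ===== SOURCE B (Python) =====
-- def find_cut_vertices(graph):
--   """Same result as A: vertices whose connected component (over the edge list)
--   is smaller than the whole vertex list. Builds an adjacency dict once, then
--   explores each component once (iterative stack + seen-set), memoizing the
--   component size of every node it contains."""
--   vertices, edges = graph[0], graph[1]
--   adj = {}
--   for e in edges:
--     a, b = e[0], e[1]
--     adj.setdefault(a, []).append(b)
--     adj.setdefault(b, []).append(a)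
--   n = len(vertices)
--   comp = {}  # node -> size of its connected component
--   cut_vertices = []
--   for v in vertices:
--     if v not in comp:
--       seen = {v}
--       stack = [v]
--       while stack:
--         u = stack.pop()
--         for w in adj.get(u, []):
--           if w not in seen:
--             seen.add(w)
--             stack.append(w)
--       for u in seen:
--         comp[u] = len(seen)
--     if comp[v] < n:
--       cut_vertices.append(v)
--   return cut_vertices
-- ===== Notes on version B (the rewrite author's own statement) =====
-- stated objective: faster
-- what changed: A launches a recursive DFS from every vertex, rescanning the whole edge list and doing linear list-membership tests at each step; B builds an adjacency dict once and explores each connected component exactly once with an iterative stack and a seen-set, memoizing the component size of every node so repeated vertices of a component cost a dict lookup.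
-- outside the precondition, e.g. on find_cut_vertices(([], [[5]])): A returns [], B raises IndexError
import Mathlib
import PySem

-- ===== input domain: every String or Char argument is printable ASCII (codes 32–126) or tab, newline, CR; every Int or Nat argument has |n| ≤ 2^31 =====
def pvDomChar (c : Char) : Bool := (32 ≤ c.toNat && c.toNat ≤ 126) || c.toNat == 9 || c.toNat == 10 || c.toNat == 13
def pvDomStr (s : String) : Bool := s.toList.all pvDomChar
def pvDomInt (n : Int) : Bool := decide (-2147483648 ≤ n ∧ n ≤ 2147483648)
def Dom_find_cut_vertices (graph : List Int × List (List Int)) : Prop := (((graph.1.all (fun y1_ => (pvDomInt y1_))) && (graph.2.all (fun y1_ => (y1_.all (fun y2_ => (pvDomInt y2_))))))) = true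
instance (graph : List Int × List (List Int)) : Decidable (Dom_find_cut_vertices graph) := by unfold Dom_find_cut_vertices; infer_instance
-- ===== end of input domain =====

-- B replaces A's per-vertex recursive DFS (which rescans the whole edge list and a growing
-- visited *list*) with an adjacency dict built once and one iterative stack walk per connected
-- component, memoizing each node's component size (measured faster in a timing run).

-- ===== PORT A =====
-- recursive DFS; `fuel` only bounds the recursion depth (2*|edges|+1 always suffices,
-- since every recursive call adds a previously unvisited edge endpoint to `visited`)
def dfsA (edges : List (List Int)) : Nat → Int → List Int → List Int
  | 0, vertex, visited => visited ++ [vertex]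
  | fuel+1, vertex, visited =>
    edges.foldl (fun vis nb =>
      if PySem.List.pyGetD nb 0 0 = vertex then
        (if PySem.List.pyGetD nb 1 0 ∈ vis then vis
         else dfsA edges fuel (PySem.List.pyGetD nb 1 0) vis)
      else if PySem.List.pyGetD nb 1 0 = vertex then
        (if PySem.List.pyGetD nb 0 0 ∈ vis then vis
         else dfsA edges fuel (PySem.List.pyGetD nb 0 0) vis)
      else vis)
      (visited ++ [vertex])

def find_cut_vertices (graph : List Int × List (List Int)) : List Int :=
  graph.1.foldl (fun cut_vertices vertex =>
    if (dfsA graph.2 (2 * graph.2.length + 1) vertex []).length < graph.1.length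
    then cut_vertices ++ [vertex] else cut_vertices) []

-- ===== PORT B =====
def adjOf (edges : List (List Int)) : PySem.Dict Int (List Int) :=
  edges.foldl (fun d e =>
    ((d.modify (PySem.List.pyGetD e 0 0) [] (fun l => l ++ [PySem.List.pyGetD e 1 0])).modify
       (PySem.List.pyGetD e 1 0) [] (fun l => l ++ [PySem.List.pyGetD e 0 0])))
    PySem.Dict.empty

-- the `while stack:` loop; `fuel` only bounds the iteration count (4*|edges|+2 always suffices)
def bfsB (adj : PySem.Dict Int (List Int)) : Nat → PySem.Set Int → List Int → PySem.Set Int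
  | 0, seen, _ => seen
  | fuel+1, seen, stack =>
    match stack.getLast? with
    | none => seen
    | some u =>
      let p := (adj.getD u []).foldl
        (fun (p : PySem.Set Int × List Int) w =>
          if w ∈ p.1 then p else (PySem.Set.add p.1 w, p.2 ++ [w]))
        (seen, stack.dropLast)
      bfsB adj fuel p.1 p.2

def find_cut_vertices_alt (graph : List Int × List (List Int)) : List Int :=
  let adj := adjOf graph.2
  let n := graph.1.length
  (graph.1.foldl (fun (st : PySem.Dict Int Nat × List Int) v =>
    let comp :=
      if st.1.contains v then st.1
      else
        let seen := bfsB adj (4 * graph.2.length + 2) (PySem.Set.add PySem.Set.empty v) [v]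
        seen.foldl (fun c u => c.insert u seen.length) st.1
    (comp, if comp.getD v 0 < n then st.2 ++ [v] else st.2))
    (PySem.Dict.empty, [])).2

-- ===== PRECONDITION & SPEC =====
-- Pre_ excludes graphs having an edge with fewer than two endpoints: there e[0]/e[1]
-- raises IndexError in both programs whenever it is reached (A returns [] only vacuously
-- when the vertex list is empty, B raises already while building the adjacency dict).
def Pre_find_cut_vertices (graph : List Int × List (List Int)) : Prop :=
  ∀ e ∈ graph.2, 2 ≤ e.length
instance (graph : List Int × List (List Int)) : Decidable (Pre_find_cut_vertices graph) := by
  unfold Pre_find_cut_vertices; infer_instance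

def pvWitness_find_cut_vertices : (List Int × List (List Int)) := ([1, 2, 3], [[1, 2]])

def Spec_find_cut_vertices (graph : List Int × List (List Int)) (out : List Int) : Prop :=
  out = find_cut_vertices_alt graph
instance (graph : List Int × List (List Int)) (out : List Int) :
    Decidable (Spec_find_cut_vertices graph out) := by unfold Spec_find_cut_vertices; infer_instance

-- ===== CLAIM (what is proved, stated in full; the proofs are below) =====
def Claim_equal_find_cut_vertices : Prop :=
  ∀ (graph : List Int × List (List Int)), Dom_find_cut_vertices graph →
    Pre_find_cut_vertices graph → Spec_find_cut_vertices graph (find_cut_vertices graph)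

-- ===== LEMMAS AND PROOFS =====

-- edge endpoints, as both ports read them
def g0 (e : List Int) : Int := PySem.List.pyGetD e 0 0
def g1 (e : List Int) : Int := PySem.List.pyGetD e 1 0
def nodes (edges : List (List Int)) : List Int := edges.flatMap (fun e => [g0 e, g1 e])
-- a and b joined by some edge
def eStep (edges : List (List Int)) (a b : Int) : Prop :=
  ∃ e ∈ edges, (g0 e = a ∧ g1 e = b) ∨ (g0 e = b ∧ g1 e = a)
-- number of distinct endpoints not yet in S
def freshCnt (edges : List (List Int)) (S : List Int) : Nat :=
  ((PySem.List.dedup (nodes edges)).filter (fun x => decide (x ∉ S))).length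

-- the loop body of dfsA's fold, named
def stepA (edges : List (List Int)) (fuel : Nat) (vertex : Int) (vis : List Int) (nb : List Int) : List Int :=
  if g0 nb = vertex then (if g1 nb ∈ vis then vis else dfsA edges fuel (g1 nb) vis)
  else if g1 nb = vertex then (if g0 nb ∈ vis then vis else dfsA edges fuel (g0 nb) vis)
  else vis

lemma dfsA_succ (edges : List (List Int)) (fuel : Nat) (v : Int) (vis : List Int) :
    dfsA edges (fuel+1) v vis = edges.foldl (stepA edges fuel v) (vis ++ [v]) := rfl

lemma foldl_isPrefix {α β : Type} (f : List α → β → List α) (l : List β) (acc : List α)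
    (h : ∀ acc x, acc <+: f acc x) : acc <+: l.foldl f acc := by
  induction l generalizing acc with
  | nil => exact List.prefix_refl _
  | cons x t ih => exact (h acc x).trans (ih (f acc x))

lemma dfsA_prefix (edges : List (List Int)) :
    ∀ fuel v vis, vis ++ [v] <+: dfsA edges fuel v vis := by
  intro fuel
  induction fuel with
  | zero => intro v vis; simp [dfsA]
  | succ f IH =>
    intro v vis
    rw [dfsA_succ]
    refine foldl_isPrefix _ edges (vis ++ [v]) ?_
    intro acc nb
    unfold stepA
    split_ifs with h1 h2 h3 h4 <;>
      first
        | exact List.prefix_refl _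
        | exact (List.prefix_append acc _).trans (IH _ acc)

lemma stepA_prefix (edges : List (List Int)) (fuel : Nat) (v : Int) (vis nb : List Int) :
    vis <+: stepA edges fuel v vis nb := by
  unfold stepA
  split_ifs with h1 h2 h3 h4 <;>
    first
      | exact List.prefix_refl _
      | exact (List.prefix_append vis _).trans (dfsA_prefix edges fuel _ vis)

lemma mem_dfsA_self (edges : List (List Int)) (fuel : Nat) (v : Int) (vis : List Int) :
    v ∈ dfsA edges fuel v vis :=
  (dfsA_prefix edges fuel v vis).subset (by simp)

lemma mem_dfsA_of_mem (edges : List (List Int)) (fuel : Nat) (v : Int) (vis : List Int)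
    {x : Int} (hx : x ∈ vis) : x ∈ dfsA edges fuel v vis :=
  (dfsA_prefix edges fuel v vis).subset (by simp [hx])

lemma foldA_prefix (edges : List (List Int)) (fuel : Nat) (v : Int) (l : List (List Int))
    (acc : List Int) : acc <+: l.foldl (stepA edges fuel v) acc :=
  foldl_isPrefix _ l acc (fun a x => stepA_prefix edges fuel v a x)

lemma dfsA_subset (edges : List (List Int)) {C : Int → Prop}
    (hC : ∀ a b, C a → eStep edges a b → C b) :
    ∀ fuel v vis, C v → (∀ x ∈ vis, C x) → ∀ x ∈ dfsA edges fuel v vis, C x := by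
  intro fuel
  induction fuel with
  | zero =>
    intro v vis hv hvis x hx
    simp only [dfsA, List.mem_append, List.mem_singleton] at hx
    rcases hx with hx | rfl
    · exact hvis x hx
    · exact hv
  | succ f IH =>
    intro v vis hv hvis
    rw [dfsA_succ]
    have aux : ∀ (l : List (List Int)), (∀ e ∈ l, e ∈ edges) →
        ∀ acc, (∀ x ∈ acc, C x) → ∀ x ∈ l.foldl (stepA edges f v) acc, C x := by
      intro l
      induction l with
      | nil => intro _ acc hacc x hx; simpa using hacc x hx
      | cons e t IHl =>
        intro hsub acc hacc
        simp only [List.foldl_cons]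
        refine IHl (fun e' he' => hsub e' (List.mem_cons_of_mem _ he')) _ ?_
        intro x hx
        unfold stepA at hx
        split_ifs at hx with h1 h2 h3 h4
        · exact hacc x hx
        · have hb : C (g1 e) :=
            hC v (g1 e) hv ⟨e, hsub e (List.mem_cons_self), Or.inl ⟨h1, rfl⟩⟩
          exact IH (g1 e) acc hb hacc x hx
        · exact hacc x hx
        · have hb : C (g0 e) :=
            hC v (g0 e) hv ⟨e, hsub e (List.mem_cons_self), Or.inr ⟨rfl, h3⟩⟩
          exact IH (g0 e) acc hb hacc x hx
        · exact hacc x hx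
    refine aux edges (fun _ h => h) (vis ++ [v]) ?_
    intro x hx
    rcases List.mem_append.1 hx with hx | hx
    · exact hvis x hx
    · simp only [List.mem_singleton] at hx; subst hx; exact hv

lemma dfsA_nodup (edges : List (List Int)) :
    ∀ fuel v vis, vis.Nodup → v ∉ vis → (dfsA edges fuel v vis).Nodup := by
  intro fuel
  induction fuel with
  | zero =>
    intro v vis hvis hv
    simp only [dfsA]
    refine List.Nodup.append hvis (List.nodup_singleton v) ?_
    intro a ha hb
    exact hv ((List.mem_singleton.1 hb) ▸ ha)
  | succ f IH =>
    intro v vis hvis hv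
    rw [dfsA_succ]
    have aux : ∀ (l : List (List Int)) (acc : List Int), acc.Nodup →
        (l.foldl (stepA edges f v) acc).Nodup := by
      intro l
      induction l with
      | nil => intro acc h; simpa using h
      | cons e t IHl =>
        intro acc hacc
        simp only [List.foldl_cons]
        refine IHl _ ?_
        unfold stepA
        split_ifs with h1 h2 h3 h4 <;>
          first
            | exact hacc
            | exact IH _ acc hacc (by assumption)
    refine aux edges (vis ++ [v]) ?_
    refine List.Nodup.append hvis (List.nodup_singleton v) ?_
    intro a ha hb
    exact hv ((List.mem_singleton.1 hb) ▸ ha)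

lemma length_filter_lt {α : Type} (p q : α → Bool) (l : List α) (b : α)
    (himp : ∀ x, p x = true → q x = true) (hb : b ∈ l) (hqb : q b = true) (hpb : p b = false) :
    (l.filter p).length < (l.filter q).length := by
  induction l with
  | nil => cases hb
  | cons a t ih =>
    rcases List.mem_cons.1 hb with rfl | hb'
    · have hle : (t.filter p).length ≤ (t.filter q).length := by
        simp only [← List.countP_eq_length_filter]
        exact List.countP_mono_left (fun x _ h => himp x h)
      simp [hqb, hpb]
      omega
    · simp only [List.filter_cons]
      have ht := ih hb'
      cases hp : p a
      · cases hq : q a <;> simp <;> omega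
      · have hq := himp a hp
        simp [hq]
        omega

lemma freshCnt_mono (edges : List (List Int)) {S T : List Int} (h : ∀ x ∈ S, x ∈ T) :
    freshCnt edges T ≤ freshCnt edges S := by
  unfold freshCnt
  simp only [← List.countP_eq_length_filter]
  refine List.countP_mono_left ?_
  intro x _ hx
  simp only [decide_eq_true_eq] at hx ⊢
  exact fun hxS => hx (h x hxS)

lemma freshCnt_append_lt (edges : List (List Int)) {S : List Int} {b : Int}
    (hb : b ∈ nodes edges) (hbS : b ∉ S) :
    freshCnt edges (S ++ [b]) < freshCnt edges S := by
  unfold freshCnt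
  refine length_filter_lt _ _ _ b ?_ ?_ ?_ ?_
  · intro x hx
    simp only [decide_eq_true_eq, List.mem_append, List.mem_singleton] at hx ⊢
    exact fun h => hx (Or.inl h)
  · rw [PySem.List.dedup_eq_ofList, PySem.Set.mem_ofList]; exact hb
  · simpa using hbS
  · simp

lemma nodes_length (edges : List (List Int)) : (nodes edges).length = 2 * edges.length := by
  induction edges with
  | nil => rfl
  | cons e t ih =>
    have : nodes (e :: t) = [g0 e, g1 e] ++ nodes t := rfl
    rw [this, List.length_append, ih]
    simp only [List.length_cons, List.length_nil, List.length_cons]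
    omega

lemma freshCnt_le (edges : List (List Int)) (S : List Int) :
    freshCnt edges S ≤ 2 * edges.length := by
  unfold freshCnt
  calc _ ≤ (PySem.List.dedup (nodes edges)).length := List.length_filter_le _ _
    _ ≤ (nodes edges).length := by
        rw [PySem.List.dedup_eq_ofList]; exact PySem.Set.length_ofList_le _
    _ = 2 * edges.length := nodes_length edges

lemma mem_nodes_g0 {edges : List (List Int)} {e : List Int} (he : e ∈ edges) :
    g0 e ∈ nodes edges := by simp [nodes, List.mem_flatMap]; exact ⟨e, he, by simp⟩

lemma mem_nodes_g1 {edges : List (List Int)} {e : List Int} (he : e ∈ edges) :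
    g1 e ∈ nodes edges := by simp [nodes, List.mem_flatMap]; exact ⟨e, he, by simp⟩

-- the visited list returned by dfsA is closed at every newly visited vertex, given enough fuel
lemma dfsA_closed (edges : List (List Int)) :
    ∀ fuel v vis, freshCnt edges (vis ++ [v]) < fuel →
      ∀ a, a ∈ dfsA edges fuel v vis → a ∉ vis →
        ∀ b, eStep edges a b → b ∈ dfsA edges fuel v vis := by
  intro fuel
  induction fuel with
  | zero => intro v vis h; exact absurd h (Nat.not_lt_zero _)
  | succ f IH =>
    intro v vis hfuel a ha hna b hb
    rw [dfsA_succ] at ha ⊢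
    -- closedness at the root vertex v itself: each incident edge is handled when the fold reaches it
    have hvert : ∀ (l : List (List Int)) (acc : List Int), v ∈ acc → ∀ e ∈ l, ∀ c,
        ((g0 e = v ∧ g1 e = c) ∨ (g0 e = c ∧ g1 e = v)) →
        c ∈ List.foldl (stepA edges f v) acc l := by
      intro l
      induction l with
      | nil => intro acc _ e he; cases he
      | cons e0 t IHl =>
        intro acc hvacc e he c hc
        simp only [List.foldl_cons]
        rcases List.mem_cons.1 he with rfl | het
        · have hbstep : c ∈ stepA edges f v acc e := by
            unfold stepA
            rcases hc with ⟨h0, h1⟩ | ⟨h0, h1⟩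
            · subst h1
              rw [if_pos h0]
              by_cases hbin : g1 e ∈ acc
              · rw [if_pos hbin]; exact hbin
              · rw [if_neg hbin]; exact mem_dfsA_self edges f (g1 e) acc
            · subst h0
              by_cases h00 : g0 e = v
              · rw [if_pos h00, h00]
                by_cases hbin : g1 e ∈ acc
                · rw [if_pos hbin]; exact hvacc
                · rw [if_neg hbin]; exact mem_dfsA_of_mem _ _ _ _ hvacc
              · rw [if_neg h00, if_pos h1]
                by_cases hbin : g0 e ∈ acc
                · rw [if_pos hbin]; exact hbin
                · rw [if_neg hbin]; exact mem_dfsA_self edges f (g0 e) acc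
          exact (foldA_prefix edges f v t _).subset hbstep
        · exact IHl _ ((stepA_prefix edges f v acc e0).subset hvacc) e het c hc
    -- closedness at every vertex first visited during the fold
    have hnew : ∀ (l : List (List Int)), (∀ e ∈ l, e ∈ edges) → ∀ acc, (vis ++ [v]) <+: acc →
        ∀ a, a ∈ List.foldl (stepA edges f v) acc l → a ∉ acc →
        ∀ b, eStep edges a b → b ∈ List.foldl (stepA edges f v) acc l := by
      intro l
      induction l with
      | nil => intro _ acc _ a ha hna _ _; exact absurd ha hna
      | cons e0 t IHl =>
        intro hsub acc hpre a ha hna b hb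
        simp only [List.foldl_cons] at ha ⊢
        have hsubt : ∀ e ∈ t, e ∈ edges := fun e he => hsub e (List.mem_cons_of_mem _ he)
        -- handles both recursive-call branches uniformly
        have key : ∀ c : Int, c ∈ nodes edges → c ∉ acc →
            a ∈ dfsA edges f c acc → b ∈ dfsA edges f c acc := by
          intro c hc hcacc ha'
          have hc1 : c ∉ vis ++ [v] := fun h => hcacc (hpre.subset h)
          have h2 : freshCnt edges ((vis ++ [v]) ++ [c]) < freshCnt edges (vis ++ [v]) :=
            freshCnt_append_lt edges hc hc1
          have h1 : freshCnt edges (acc ++ [c]) ≤ freshCnt edges ((vis ++ [v]) ++ [c]) := by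
            refine freshCnt_mono edges ?_
            intro x hx
            rcases List.mem_append.1 hx with hx | hx
            · exact List.mem_append.2 (Or.inl (hpre.subset hx))
            · exact List.mem_append.2 (Or.inr hx)
          exact IH c acc (by omega) a ha' hna b hb
        rcases em (g0 e0 = v) with h1 | h1
        · rcases em (g1 e0 ∈ acc) with h2 | h2
          · have hs : stepA edges f v acc e0 = acc := by
              unfold stepA; rw [if_pos h1, if_pos h2]
            rw [hs] at ha ⊢
            exact IHl hsubt acc hpre a ha hna b hb
          · have hs : stepA edges f v acc e0 = dfsA edges f (g1 e0) acc := by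
              unfold stepA; rw [if_pos h1, if_neg h2]
            rw [hs] at ha ⊢
            rcases em (a ∈ dfsA edges f (g1 e0) acc) with ha' | ha'
            · exact (foldA_prefix edges f v t _).subset
                (key (g1 e0) (mem_nodes_g1 (hsub e0 List.mem_cons_self)) h2 ha')
            · refine IHl hsubt _ (hpre.trans ((List.prefix_append acc [g1 e0]).trans
                (dfsA_prefix edges f (g1 e0) acc))) a ha ha' b hb
        · rcases em (g1 e0 = v) with h3 | h3
          · rcases em (g0 e0 ∈ acc) with h4 | h4
            · have hs : stepA edges f v acc e0 = acc := by
                unfold stepA; rw [if_neg h1, if_pos h3, if_pos h4]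
              rw [hs] at ha ⊢
              exact IHl hsubt acc hpre a ha hna b hb
            · have hs : stepA edges f v acc e0 = dfsA edges f (g0 e0) acc := by
                unfold stepA; rw [if_neg h1, if_pos h3, if_neg h4]
              rw [hs] at ha ⊢
              rcases em (a ∈ dfsA edges f (g0 e0) acc) with ha' | ha'
              · exact (foldA_prefix edges f v t _).subset
                  (key (g0 e0) (mem_nodes_g0 (hsub e0 List.mem_cons_self)) h4 ha')
              · refine IHl hsubt _ (hpre.trans ((List.prefix_append acc [g0 e0]).trans
                  (dfsA_prefix edges f (g0 e0) acc))) a ha ha' b hb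
          · have hs : stepA edges f v acc e0 = acc := by
              unfold stepA; rw [if_neg h1, if_neg h3]
            rw [hs] at ha ⊢
            exact IHl hsubt acc hpre a ha hna b hb
    by_cases hacc : a ∈ vis ++ [v]
    · have hav : a = v := by
        rcases List.mem_append.1 hacc with h | h
        · exact absurd h hna
        · simpa using h
      subst hav
      rcases hb with ⟨e, he, hcase⟩
      exact hvert edges (vis ++ [a]) (by simp) e he b hcase
    · exact hnew edges (fun _ h => h) (vis ++ [v]) (List.prefix_refl _) a ha hacc b hb

-- ===== B-side lemmas =====

def stepB : PySem.Set Int × List Int → Int → PySem.Set Int × List Int :=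
  fun p w => if w ∈ p.1 then p else (PySem.Set.add p.1 w, p.2 ++ [w])

lemma bfsB_succ (adj : PySem.Dict Int (List Int)) (fuel : Nat) (seen : PySem.Set Int)
    (stack : List Int) :
    bfsB adj (fuel+1) seen stack =
      match stack.getLast? with
      | none => seen
      | some u =>
        let p := (adj.getD u []).foldl stepB (seen, stack.dropLast)
        bfsB adj fuel p.1 p.2 := rfl

lemma adjOf_eq (edges : List (List Int)) :
    adjOf edges = edges.foldl (fun d e =>
      ((d.modify (g0 e) [] (fun xs => xs ++ [g1 e])).modify (g1 e) [] (fun xs => xs ++ [g0 e])))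
      PySem.Dict.empty := rfl

lemma eStep_cons (e : List Int) (t : List (List Int)) (a b : Int) :
    eStep (e :: t) a b ↔ ((g0 e = a ∧ g1 e = b) ∨ (g0 e = b ∧ g1 e = a)) ∨ eStep t a b := by
  simp [eStep]

lemma mem_getD_modify_append (d : PySem.Dict Int (List Int)) (k u a w : Int) :
    w ∈ (d.modify k [] (fun xs => xs ++ [a])).getD u []
      ↔ w ∈ d.getD u [] ∨ (u = k ∧ w = a) := by
  rw [PySem.Dict.getD_modify]
  by_cases h : u = k
  · subst h; simp
  · simp [h]

lemma mem_adjOf (edges : List (List Int)) (u w : Int) :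
    w ∈ (adjOf edges).getD u [] ↔ eStep edges u w := by
  rw [adjOf_eq]
  have aux : ∀ (l : List (List Int)) (d : PySem.Dict Int (List Int)),
      w ∈ (l.foldl (fun d e =>
        ((d.modify (g0 e) [] (fun xs => xs ++ [g1 e])).modify (g1 e) [] (fun xs => xs ++ [g0 e])))
        d).getD u [] ↔ w ∈ d.getD u [] ∨ eStep l u w := by
    intro l
    induction l with
    | nil => intro d; simp [eStep]
    | cons e tl ih =>
      intro d
      simp only [List.foldl_cons]
      rw [ih, eStep_cons, mem_getD_modify_append, mem_getD_modify_append]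
      constructor
      · rintro (((h1 | ⟨h2, h3⟩) | ⟨h4, h5⟩) | h6)
        · exact Or.inl h1
        · exact Or.inr (Or.inl (Or.inl ⟨h2.symm, h3.symm⟩))
        · exact Or.inr (Or.inl (Or.inr ⟨h5.symm, h4.symm⟩))
        · exact Or.inr (Or.inr h6)
      · rintro (h1 | ((⟨h2, h3⟩ | ⟨h4, h5⟩) | h6))
        · exact Or.inl (Or.inl (Or.inl h1))
        · exact Or.inl (Or.inl (Or.inr ⟨h2.symm, h3.symm⟩))
        · exact Or.inl (Or.inr ⟨h5.symm, h4.symm⟩)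
        · exact Or.inr h6
  rw [aux edges PySem.Dict.empty]
  simp [PySem.Dict.getD_empty]

lemma b_fold_seen_mono (l : List Int) (p : PySem.Set Int × List Int) {x : Int} (hx : x ∈ p.1) :
    x ∈ (l.foldl stepB p).1 := by
  induction l generalizing p with
  | nil => exact hx
  | cons w tl ih =>
    simp only [List.foldl_cons]
    refine ih _ ?_
    unfold stepB
    split_ifs with h
    · exact hx
    · exact (PySem.Set.mem_add _ _ _).2 (Or.inl hx)

lemma b_fold_stack_mono (l : List Int) (p : PySem.Set Int × List Int) {x : Int} (hx : x ∈ p.2) :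
    x ∈ (l.foldl stepB p).2 := by
  induction l generalizing p with
  | nil => exact hx
  | cons w tl ih =>
    simp only [List.foldl_cons]
    refine ih _ ?_
    unfold stepB
    split_ifs with h
    · exact hx
    · simp only [List.mem_append]; exact Or.inl hx

lemma b_fold_adds (l : List Int) (p : PySem.Set Int × List Int) {w : Int} (hw : w ∈ l) :
    w ∈ (l.foldl stepB p).1 := by
  induction l generalizing p with
  | nil => cases hw
  | cons w0 tl ih =>
    simp only [List.foldl_cons]
    rcases List.mem_cons.1 hw with rfl | hw'
    · refine b_fold_seen_mono tl _ ?_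
      unfold stepB
      split_ifs with h
      · exact h
      · exact (PySem.Set.mem_add _ _ _).2 (Or.inr rfl)
    · exact ih _ hw'

lemma b_fold_src (l : List Int) (p : PySem.Set Int × List Int) {x : Int}
    (hx : x ∈ (l.foldl stepB p).1) : x ∈ p.1 ∨ x ∈ (l.foldl stepB p).2 := by
  induction l generalizing p with
  | nil => exact Or.inl hx
  | cons w tl ih =>
    simp only [List.foldl_cons] at hx ⊢
    rcases ih _ hx with hx' | hx'
    · unfold stepB at hx'
      split_ifs at hx' with h
      · exact Or.inl hx'
      · rcases (PySem.Set.mem_add _ _ _).1 hx' with hx'' | rfl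
        · exact Or.inl hx''
        · refine Or.inr (b_fold_stack_mono tl _ ?_)
          show x ∈ (stepB p x).2
          unfold stepB
          rw [if_neg h]
          simp
    · exact Or.inr hx'

lemma b_fold_seen_sub (l : List Int) (p : PySem.Set Int × List Int) {x : Int}
    (hx : x ∈ (l.foldl stepB p).1) : x ∈ p.1 ∨ x ∈ l := by
  induction l generalizing p with
  | nil => exact Or.inl hx
  | cons w tl ih =>
    simp only [List.foldl_cons] at hx
    rcases ih _ hx with hx' | hx'
    · unfold stepB at hx'
      split_ifs at hx' with h
      · exact Or.inl hx'
      · rcases (PySem.Set.mem_add _ _ _).1 hx' with hx'' | rfl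
        · exact Or.inl hx''
        · exact Or.inr List.mem_cons_self
    · exact Or.inr (List.mem_cons_of_mem _ hx')

lemma b_fold_stack_src (l : List Int) (p : PySem.Set Int × List Int) {x : Int}
    (hx : x ∈ (l.foldl stepB p).2) : x ∈ p.2 ∨ x ∈ (l.foldl stepB p).1 := by
  induction l generalizing p with
  | nil => exact Or.inl hx
  | cons w tl ih =>
    simp only [List.foldl_cons] at hx ⊢
    rcases ih _ hx with hx' | hx'
    · unfold stepB at hx'
      split_ifs at hx' with h
      · exact Or.inl hx'
      · simp only [List.mem_append, List.mem_singleton] at hx'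
        rcases hx' with hx'' | rfl
        · exact Or.inl hx''
        · refine Or.inr (b_fold_seen_mono tl _ ?_)
          show x ∈ (stepB p x).1
          unfold stepB
          rw [if_neg h]
          exact (PySem.Set.mem_add _ _ _).2 (Or.inr rfl)
    · exact Or.inr hx'

lemma b_fold_nodup (l : List Int) (p : PySem.Set Int × List Int) (h : p.1.Nodup) :
    (l.foldl stepB p).1.Nodup := by
  induction l generalizing p with
  | nil => exact h
  | cons w tl ih =>
    simp only [List.foldl_cons]
    refine ih _ ?_
    unfold stepB
    split_ifs with hw
    · exact h
    · exact PySem.Set.nodup_add _ _ h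

lemma b_fold_pot (edges : List (List Int)) (l : List Int) (p : PySem.Set Int × List Int)
    (hl : ∀ w ∈ l, w ∈ nodes edges) :
    2 * freshCnt edges (l.foldl stepB p).1 + (l.foldl stepB p).2.length
      ≤ 2 * freshCnt edges p.1 + p.2.length := by
  induction l generalizing p with
  | nil => exact le_refl _
  | cons w tl ih =>
    simp only [List.foldl_cons]
    refine le_trans (ih _ (fun x hx => hl x (List.mem_cons_of_mem _ hx))) ?_
    unfold stepB
    split_ifs with h
    · exact le_refl _
    · have hadd : PySem.Set.add p.1 w = p.1 ++ [w] := PySem.Set.add_of_not_mem h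
      have hlt : freshCnt edges (p.1 ++ [w]) < freshCnt edges p.1 :=
        freshCnt_append_lt edges (hl w List.mem_cons_self) h
      simp only [hadd, List.length_append, List.length_singleton]
      omega

lemma bfs_mono (adj : PySem.Dict Int (List Int)) :
    ∀ fuel seen stack, ∀ x ∈ seen, x ∈ bfsB adj fuel seen stack := by
  intro fuel
  induction fuel with
  | zero => intro seen stack x hx; exact hx
  | succ f IH =>
    intro seen stack x hx
    rw [bfsB_succ]
    cases h : stack.getLast? with
    | none => exact hx
    | some u => exact IH _ _ x (b_fold_seen_mono _ _ hx)

lemma bfs_nodup (adj : PySem.Dict Int (List Int)) :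
    ∀ fuel seen stack, List.Nodup seen → (bfsB adj fuel seen stack).Nodup := by
  intro fuel
  induction fuel with
  | zero => intro seen stack h; exact h
  | succ f IH =>
    intro seen stack h
    rw [bfsB_succ]
    cases hs : stack.getLast? with
    | none => exact h
    | some u => exact IH _ _ (b_fold_nodup _ _ h)

lemma bfs_subset (adj : PySem.Dict Int (List Int)) {C : Int → Prop}
    (hC : ∀ u w, C u → w ∈ adj.getD u [] → C w) :
    ∀ fuel seen stack, (∀ x ∈ seen, C x) → (∀ x ∈ stack, x ∈ seen) →
      ∀ x ∈ bfsB adj fuel seen stack, C x := by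
  intro fuel
  induction fuel with
  | zero => intro seen stack hseen _ x hx; exact hseen x hx
  | succ f IH =>
    intro seen stack hseen hss x hx
    rw [bfsB_succ] at hx
    cases h : stack.getLast? with
    | none => rw [h] at hx; exact hseen x hx
    | some u =>
      rw [h] at hx
      have hu : u ∈ seen := hss u (List.mem_of_getLast? h)
      
      refine IH _ _ ?_ ?_ x hx
      · intro y hy
        rcases b_fold_seen_sub _ _ hy with hy' | hy'
        · exact hseen y hy'
        · exact hC u y (hseen u hu) hy'
      · intro y hy
        rcases b_fold_stack_src _ _ hy with hy' | hy'
        · exact b_fold_seen_mono _ _ (hss y (List.mem_of_mem_dropLast hy'))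
        · exact hy'

lemma bfs_closed (edges : List (List Int)) (adj : PySem.Dict Int (List Int))
    (hN : ∀ u w, w ∈ adj.getD u [] → w ∈ nodes edges) :
    ∀ fuel seen stack, 2 * freshCnt edges seen + stack.length < fuel →
      (∀ u ∈ seen, u ∉ stack → ∀ w ∈ adj.getD u [], w ∈ seen) →
      (∀ x ∈ stack, x ∈ seen) →
      ∀ u ∈ bfsB adj fuel seen stack, ∀ w ∈ adj.getD u [], w ∈ bfsB adj fuel seen stack := by
  intro fuel
  induction fuel with
  | zero => intro seen stack h; exact absurd h (Nat.not_lt_zero _)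
  | succ f IH =>
    intro seen stack hpot hJ hss
    rw [bfsB_succ]
    cases h : stack.getLast? with
    | none =>
      have hnil : stack = [] := by simpa using h
      subst hnil
      intro u hu w hw
      exact hJ u hu (by simp) w hw
    | some u0 =>
      have hne : stack ≠ [] := by intro hn; subst hn; simp at h
      have hdecomp : stack.dropLast ++ [u0] = stack := List.dropLast_append_getLast? (l := stack) (a := u0) h
      refine IH _ _ ?_ ?_ ?_
      · -- potential decreases
        have hp := b_fold_pot edges (adj.getD u0 []) (seen, stack.dropLast) (fun w hw => hN u0 w hw)
        have hlen : stack.dropLast.length + 1 = stack.length := by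
          rw [← hdecomp]; simp
        simp only at hp
        omega
      · -- invariant J preserved
        intro x hx hnx w hw
        by_cases hxs : x ∈ seen
        · by_cases hxu : x = u0
          · subst hxu
            exact b_fold_adds _ _ hw
          · have hxstack : x ∉ stack := by
              intro hxst
              rw [← hdecomp] at hxst
              rcases List.mem_append.1 hxst with h' | h'
              · exact hnx (b_fold_stack_mono _ _ h')
              · exact hxu (List.mem_singleton.1 h')
            exact b_fold_seen_mono _ _ (hJ x hxs hxstack w hw)
        · rcases b_fold_src _ _ hx with h' | h'
          · exact absurd h' hxs
          · exact absurd h' hnx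
      · -- stack still inside seen
        intro x hx
        rcases b_fold_stack_src _ _ hx with h' | h'
        · exact b_fold_seen_mono _ _ (hss x (List.mem_of_mem_dropLast h'))
        · exact h'

-- per-vertex reachable set computed by B, named for the proofs
def reachB (edges : List (List Int)) (v : Int) : PySem.Set Int :=
  bfsB (adjOf edges) (4 * edges.length + 2) (PySem.Set.add PySem.Set.empty v) [v]

lemma seen0_eq (v : Int) : PySem.Set.add PySem.Set.empty v = [v] := rfl

lemma adjOf_nodes (edges : List (List Int)) :
    ∀ u w, w ∈ (adjOf edges).getD u [] → w ∈ nodes edges := by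
  intro u w hw
  rcases (mem_adjOf edges u w).1 hw with ⟨e, he, hc | hc⟩
  · exact hc.2 ▸ mem_nodes_g1 he
  · exact hc.1 ▸ mem_nodes_g0 he

lemma reachB_self (edges : List (List Int)) (v : Int) : v ∈ reachB edges v := by
  unfold reachB; rw [seen0_eq]
  exact bfs_mono _ _ _ _ v (List.mem_singleton_self v)

lemma reachB_nodup (edges : List (List Int)) (v : Int) : (reachB edges v).Nodup := by
  unfold reachB; rw [seen0_eq]
  exact bfs_nodup _ _ _ _ (by simp)

lemma reachB_closed (edges : List (List Int)) (v : Int) :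
    ∀ a ∈ reachB edges v, ∀ b, eStep edges a b → b ∈ reachB edges v := by
  have h : ∀ u ∈ reachB edges v, ∀ w ∈ (adjOf edges).getD u [], w ∈ reachB edges v := by
    unfold reachB; rw [seen0_eq]
    refine bfs_closed edges (adjOf edges) (adjOf_nodes edges) _ [v] [v] ?_ ?_ ?_
    · have := freshCnt_le edges [v]
      simp only [List.length_singleton]
      omega
    · intro u hu hnu
      rcases List.mem_singleton.1 hu with rfl
      exact absurd hu hnu
    · exact fun x hx => hx
  intro a ha b hab
  exact h a ha b ((mem_adjOf edges a b).2 hab)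

lemma reachB_min (edges : List (List Int)) (v : Int) {C : Int → Prop}
    (hC : ∀ a b, C a → eStep edges a b → C b) (hv : C v) :
    ∀ x ∈ reachB edges v, C x := by
  unfold reachB; rw [seen0_eq]
  refine bfs_subset (adjOf edges)
    (hC := fun u w hu hw => hC u w hu ((mem_adjOf edges u w).1 hw)) _ _ _ ?_ (fun x hx => hx)
  intro x hx
  rcases List.mem_singleton.1 hx with rfl
  exact hv

lemma eStep_symm {edges : List (List Int)} {a b : Int} (h : eStep edges a b) :
    eStep edges b a := by
  rcases h with ⟨e, he, hc | hc⟩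
  · exact ⟨e, he, Or.inr hc⟩
  · exact ⟨e, he, Or.inl hc⟩

lemma reachB_subset_of_mem (edges : List (List Int)) {u v : Int} (hu : u ∈ reachB edges v) :
    ∀ x ∈ reachB edges u, x ∈ reachB edges v :=
  reachB_min edges u (fun a b ha hab => reachB_closed edges v a ha b hab) hu

lemma reachB_mem_symm (edges : List (List Int)) {u v : Int} (hu : u ∈ reachB edges v) :
    v ∈ reachB edges u := by
  refine reachB_min edges v (C := fun x => v ∈ reachB edges x) ?_ (reachB_self edges v) u hu
  intro a b ha hab
  refine reachB_subset_of_mem edges ?_ v ha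
  exact reachB_closed edges b b (reachB_self edges b) a (eStep_symm hab)

lemma reachB_len_eq (edges : List (List Int)) {u v : Int} (hu : u ∈ reachB edges v) :
    (reachB edges u).length = (reachB edges v).length := by
  refine List.Perm.length_eq ?_
  refine (List.perm_ext_iff_of_nodup (reachB_nodup edges u) (reachB_nodup edges v)).2 ?_
  intro x
  exact ⟨reachB_subset_of_mem edges hu x, reachB_subset_of_mem edges (reachB_mem_symm edges hu) x⟩

-- the two per-vertex explorations visit the same number of vertices
lemma reach_len (edges : List (List Int)) (v : Int) :
    (dfsA edges (2 * edges.length + 1) v []).length = (reachB edges v).length := by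
  have hfuelA : freshCnt edges ([] ++ [v]) < 2 * edges.length + 1 :=
    lt_of_le_of_lt (freshCnt_le edges _) (by omega)
  have hRnodup : (dfsA edges (2 * edges.length + 1) v []).Nodup :=
    dfsA_nodup edges _ v [] (by simp) (by simp)
  have hRclosed : ∀ a b, a ∈ dfsA edges (2 * edges.length + 1) v [] → eStep edges a b →
      b ∈ dfsA edges (2 * edges.length + 1) v [] := by
    intro a b ha hab
    exact dfsA_closed edges _ v [] hfuelA a ha (by simp) b hab
  have hRS : ∀ x ∈ dfsA edges (2 * edges.length + 1) v [], x ∈ reachB edges v := by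
    refine dfsA_subset edges (C := fun x => x ∈ reachB edges v)
      (fun a b ha hab => reachB_closed edges v a ha b hab) _ v [] (reachB_self edges v) (by simp)
  have hSR : ∀ x ∈ reachB edges v, x ∈ dfsA edges (2 * edges.length + 1) v [] := by
    refine reachB_min edges v (C := fun x => x ∈ dfsA edges (2 * edges.length + 1) v [])
      (fun a b ha hab => hRclosed a b ha hab) (mem_dfsA_self edges _ v []) ;
  exact ((List.perm_ext_iff_of_nodup hRnodup (reachB_nodup edges v)).2
    (fun a => ⟨hRS a, hSR a⟩)).length_eq

-- the comp-dict fold: a batch insert of one constant value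
lemma getD_foldl_insert_const (l : List Int) (c : PySem.Dict Int Nat) (k : Nat) (u : Int) :
    (l.foldl (fun c x => c.insert x k) c).getD u 0 = if u ∈ l then k else c.getD u 0 := by
  induction l generalizing c with
  | nil => simp
  | cons x tl ih =>
    simp only [List.foldl_cons, ih, PySem.Dict.getD_insert, List.mem_cons]
    by_cases h1 : u ∈ tl <;> by_cases h2 : u = x <;> simp [h1, h2]

lemma contains_foldl_insert_const (l : List Int) (c : PySem.Dict Int Nat) (k : Nat) (u : Int) :
    (l.foldl (fun c x => c.insert x k) c).contains u = true ↔ (u ∈ l ∨ c.contains u = true) := by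
  induction l generalizing c with
  | nil => simp
  | cons x tl ih =>
    simp only [List.foldl_cons, ih, PySem.Dict.contains_insert, List.mem_cons]
    by_cases h1 : u ∈ tl <;> by_cases h2 : u = x <;> simp [h1, h2]

-- the main loop with the memoizing component dict equals the plain per-vertex loop
lemma main_fold (edges : List (List Int)) (n : Nat) :
    ∀ (vs : List Int) (comp : PySem.Dict Int Nat) (cut : List Int),
      (∀ u, comp.contains u = true → comp.getD u 0 = (reachB edges u).length) →
      (vs.foldl (fun (st : PySem.Dict Int Nat × List Int) v =>
          let comp' :=
            if st.1.contains v then st.1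
            else (reachB edges v).foldl (fun c u => c.insert u (reachB edges v).length) st.1
          (comp', if comp'.getD v 0 < n then st.2 ++ [v] else st.2)) (comp, cut)).2
        = vs.foldl (fun cut v => if (reachB edges v).length < n then cut ++ [v] else cut) cut := by
  intro vs
  induction vs with
  | nil => intro comp cut _; rfl
  | cons v tl ih =>
    intro comp cut hinv
    simp only [List.foldl_cons]
    by_cases hc : comp.contains v
    · simp only [if_pos hc, hinv v hc]
      exact ih comp _ hinv
    · simp only [if_neg hc]
      have hgetv : ((reachB edges v).foldl
          (fun c u => c.insert u (reachB edges v).length) comp).getD v 0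
          = (reachB edges v).length := by
        rw [getD_foldl_insert_const]
        simp [reachB_self edges v]
      have hinv' : ∀ u, ((reachB edges v).foldl
          (fun c u => c.insert u (reachB edges v).length) comp).contains u = true →
          ((reachB edges v).foldl
            (fun c u => c.insert u (reachB edges v).length) comp).getD u 0
            = (reachB edges u).length := by
        intro u hu
        rw [getD_foldl_insert_const]
        by_cases hmem : u ∈ reachB edges v
        · simp only [hmem, if_true]
          exact (reachB_len_eq edges hmem).symm
        · simp only [hmem, if_false]
          rcases (contains_foldl_insert_const _ _ _ _).1 hu with h | h
          · exact absurd h hmem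
          · exact hinv u h
      simp only [hgetv]
      exact ih _ _ hinv'

-- ===== VERDICT (by name: the statement is the Claim_ definition above) =====
theorem find_cut_vertices_spec : Claim_equal_find_cut_vertices := by
  intro graph _ _
  unfold Spec_find_cut_vertices
  have hA : find_cut_vertices graph
      = graph.1.foldl (fun cut v =>
          if (reachB graph.2 v).length < graph.1.length then cut ++ [v] else cut) [] := by
    unfold find_cut_vertices
    apply PySem.List.foldl_congr_mem
    intro acc v _
    rw [reach_len]
  have hB : find_cut_vertices_alt graph
      = (graph.1.foldl (fun (st : PySem.Dict Int Nat × List Int) v =>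
          let comp' :=
            if st.1.contains v then st.1
            else (reachB graph.2 v).foldl (fun c u => c.insert u (reachB graph.2 v).length) st.1
          (comp', if comp'.getD v 0 < graph.1.length then st.2 ++ [v] else st.2))
          (PySem.Dict.empty, [])).2 := rfl
  rw [hA, hB, main_fold graph.2 graph.1.length graph.1 PySem.Dict.empty []
    (by intro u hu; simp at hu)]
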